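-- pv_equiv track=rewrite | github.com/thalesjacobi/obelisk-stamps | ml/stamp_detector/detector.py | _best_valley_cut
-- ===== SOURCE A (Python) =====
-- from typing import List, Optional, Tuple, Union
--
-- def _best_valley_cut(valleys: List[Tuple[int, int]], size: int) -> Optional[int]:
--     """
--     Find the best single valley cut position near the center of the image.
--
--     Only considers valleys within the middle 60% of the image (20%-80%).
--     Returns the center of the widest qualifying valley, or None.
--     """
--     candidates = []
--     for a, b in valleys:
--         mid = (a + b) // 2
--         if int(size * 0.20) <= mid <= int(size * 0.80):
--             candidates.append((b - a + 1, mid))  # (width, center)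
--     if not candidates:
--         return None
--     # Return the cut from the widest valley
--     candidates.sort(reverse=True)
--     return candidates[0][1]
-- ===== SOURCE B (Python) =====
-- from typing import List, Optional, Tuple
--
-- def _best_valley_cut(valleys: List[Tuple[int, int]], size: int) -> Optional[int]:
--     """Single-pass running maximum: no candidate list, no sort."""
--     lo = int(size * 0.20)
--     hi = int(size * 0.80)
--     best = None
--     for a, b in valleys:
--         mid = (a + b) // 2
--         if lo <= mid <= hi:
--             cand = (b - a + 1, mid)
--             if best is None or cand > best:
--                 best = cand
--     return best[1] if best is not None else None
-- ===== Notes on version B (the rewrite author's own statement) =====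
-- stated objective: simpler
-- what changed: Replaces the build-a-candidate-list-then-sort(reverse=True)-and-take-head approach with a single pass over the valleys that keeps a running lexicographic maximum (width, center) tuple, so no intermediate list and no sort.
import Mathlib
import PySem

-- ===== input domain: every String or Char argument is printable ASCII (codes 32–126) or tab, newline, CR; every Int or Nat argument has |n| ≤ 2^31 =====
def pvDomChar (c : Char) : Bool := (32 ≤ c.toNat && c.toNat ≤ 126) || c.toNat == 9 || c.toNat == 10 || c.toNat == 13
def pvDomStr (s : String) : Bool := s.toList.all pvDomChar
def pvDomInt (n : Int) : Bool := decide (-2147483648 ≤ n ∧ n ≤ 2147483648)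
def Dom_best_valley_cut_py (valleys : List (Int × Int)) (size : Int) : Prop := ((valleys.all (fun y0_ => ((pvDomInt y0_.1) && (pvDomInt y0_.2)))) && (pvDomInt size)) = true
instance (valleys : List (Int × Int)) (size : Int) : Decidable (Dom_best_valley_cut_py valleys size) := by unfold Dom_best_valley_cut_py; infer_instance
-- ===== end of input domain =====

-- B replaces A's build-candidates-then-sort(reverse=True)-take-head by a single pass keeping a
-- running lexicographic maximum (width, center); objective: simpler (no intermediate list, no sort).


-- Shared helper (the band bounds both Pythons compute): the exact value of Python's
-- int(n * c) where c is the IEEE-754 double with significand 3602879701896397 and exponent -e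
-- (c = 0.2 for e = 54, c = 0.8 for e = 52).  float(n) is exact for |n| ≤ 2^53 (the whole Dom),
-- the product n*c is rounded to nearest-even at 53 significant bits, int() truncates toward zero.
def pvTruncMul (n : Int) (e : Nat) : Int :=
  let p := n.natAbs * 3602879701896397
  let t := (Nat.log2 p + 1) - 53
  let q := p >>> t
  let q1 := if 0 < t ∧ (2^(t-1) < p % 2^t ∨ (p % 2^t = 2^(t-1) ∧ q % 2 = 1)) then q + 1 else q
  let v := (q1 <<< t) >>> e
  if n < 0 then -(v : Int) else (v : Int)

-- ===== PORT A =====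
def best_valley_cut_py (valleys : List (Int × Int)) (size : Int) : Option Int :=
  let candidates := valleys.foldl (fun acc ab =>
    let mid := PySem.Int.floordiv (ab.1 + ab.2) 2
    if pvTruncMul size 54 ≤ mid ∧ mid ≤ pvTruncMul size 52 then
      acc ++ [(ab.2 - ab.1 + 1, mid)]
    else acc) []
  if candidates = [] then none
  else
    match PySem.List.sorted2 candidates (fun c => c.1) (fun c => c.2) true with
    | [] => none
    | c :: _ => some c.2

-- ===== PORT B =====
-- B-side helper: 'if best is None or cand > best: best = cand' (Python tuple > is strict lex)
def pvUpd (best : Option (Int × Int)) (cand : Int × Int) : Option (Int × Int) :=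
  match best with
  | none => some cand
  | some b => if b.1 < cand.1 ∨ (b.1 = cand.1 ∧ b.2 < cand.2) then some cand else some b

def best_valley_cut_py_alt (valleys : List (Int × Int)) (size : Int) : Option Int :=
  let lo := pvTruncMul size 54
  let hi := pvTruncMul size 52
  let best := valleys.foldl (fun best ab =>
    let mid := PySem.Int.floordiv (ab.1 + ab.2) 2
    if lo ≤ mid ∧ mid ≤ hi then pvUpd best (ab.2 - ab.1 + 1, mid) else best) none
  best.map (fun b => b.2)

-- ===== PRECONDITION & SPEC =====
def Spec_best_valley_cut_py (valleys : List (Int × Int)) (size : Int) (out : Option Int) : Prop := out = best_valley_cut_py_alt valleys size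
instance (valleys : List (Int × Int)) (size : Int) (out : Option Int) : Decidable (Spec_best_valley_cut_py valleys size out) := by unfold Spec_best_valley_cut_py; infer_instance

-- ===== CLAIM (what is proved, stated in full; the proofs are below) =====
def Claim_equal_best_valley_cut_py : Prop := ∀ (valleys : List (Int × Int)) (size : Int), Dom_best_valley_cut_py valleys size → Spec_best_valley_cut_py valleys size (best_valley_cut_py valleys size)

-- ===== LEMMAS AND PROOFS =====

-- Python's strict lexicographic order on int 2-tuples
def pvLt (a b : Int × Int) : Prop := a.1 < b.1 ∨ (a.1 = b.1 ∧ a.2 < b.2)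

theorem pvLt_irrefl (a : Int × Int) : ¬ pvLt a a := by unfold pvLt; omega

theorem pvLt_trans {a b c : Int × Int} (h1 : pvLt a b) (h2 : pvLt b c) : pvLt a c := by
  unfold pvLt at *; omega

theorem pvLt_resolve {a b : Int × Int} (h1 : ¬ pvLt a b) (h2 : ¬ pvLt b a) : a = b := by
  rw [Prod.ext_iff]; unfold pvLt at *; omega

-- the comparison sorted2 uses with reverse = True and keys fst, snd
def pvBefore (a b : Int × Int) : Bool :=
  decide (b.1 < a.1) || (!decide (a.1 < b.1) && decide (b.2 < a.2))

theorem pvBefore_iff (a b : Int × Int) : pvBefore a b = true ↔ pvLt b a := by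
  unfold pvBefore pvLt; simp; omega

theorem sorted2_eq (cs : List (Int × Int)) :
    PySem.List.sorted2 cs (fun c => c.1) (fun c => c.2) true
      = cs.foldl (fun acc x => PySem.List.insertBy pvBefore x acc) [] := rfl

theorem insertBy_pairwise (x : Int × Int) (l : List (Int × Int))
    (h : l.Pairwise (fun a b => ¬ pvLt a b)) :
    (PySem.List.insertBy pvBefore x l).Pairwise (fun a b => ¬ pvLt a b) := by
  induction l with
  | nil => simp [PySem.List.insertBy]
  | cons y ys ih =>
    rw [List.pairwise_cons] at h
    obtain ⟨hy, hys⟩ := h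
    by_cases hb : pvBefore x y = true
    · have hyx : pvLt y x := (pvBefore_iff x y).mp hb
      rw [show PySem.List.insertBy pvBefore x (y :: ys) = x :: y :: ys from by
        simp [PySem.List.insertBy, hb]]
      refine List.Pairwise.cons ?_ (List.Pairwise.cons hy hys)
      intro z hz
      rcases List.mem_cons.mp hz with rfl | hz'
      · exact fun hxz => pvLt_irrefl _ (pvLt_trans hyx hxz)
      · exact fun hxz => (hy z hz') (pvLt_trans hyx hxz)
    · have hnyx : ¬ pvLt y x := fun hc => hb ((pvBefore_iff x y).mpr hc)
      rw [show PySem.List.insertBy pvBefore x (y :: ys) = y :: PySem.List.insertBy pvBefore x ys from by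
        simp [PySem.List.insertBy, hb]]
      refine List.Pairwise.cons ?_ (ih hys)
      intro z hz
      rcases (PySem.List.mem_insertBy pvBefore x z ys).mp hz with rfl | hz'
      · exact hnyx
      · exact hy z hz'

theorem fold_pairwise (cs : List (Int × Int)) :
    ∀ l, l.Pairwise (fun a b => ¬ pvLt a b) →
      (cs.foldl (fun acc x => PySem.List.insertBy pvBefore x acc) l).Pairwise (fun a b => ¬ pvLt a b) := by
  induction cs with
  | nil => intro l h; exact h
  | cons c cs ih =>
    intro l h
    rw [List.foldl_cons]
    exact ih _ (insertBy_pairwise c l h)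

-- the running-maximum fold returns the first lex-maximal element
theorem updFold_spec : ∀ (cs : List (Int × Int)) (m : Int × Int),
    ∃ m', List.foldl pvUpd (some m) cs = some m' ∧ m' ∈ m :: cs ∧ ∀ y ∈ m :: cs, ¬ pvLt m' y := by
  intro cs
  induction cs with
  | nil =>
    intro m
    refine ⟨m, rfl, by simp, ?_⟩
    intro y hy
    rw [List.mem_singleton] at hy
    subst hy
    exact pvLt_irrefl _
  | cons c cs ih =>
    intro m
    rw [List.foldl_cons]
    by_cases h : m.1 < c.1 ∨ (m.1 = c.1 ∧ m.2 < c.2)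
    · have hlt : pvLt m c := h
      have hstep : pvUpd (some m) c = some c := by
        rw [show pvUpd (some m) c
              = if m.1 < c.1 ∨ (m.1 = c.1 ∧ m.2 < c.2) then some c else some m from rfl,
           if_pos h]
      rw [hstep]
      obtain ⟨m', heq, hmem, hmax⟩ := ih c
      refine ⟨m', heq, List.mem_cons_of_mem _ hmem, ?_⟩
      intro y hy
      rcases List.mem_cons.mp hy with rfl | hy'
      · intro hc
        exact hmax c List.mem_cons_self (pvLt_trans hc hlt)
      · exact hmax y hy'
    · have hnlt : ¬ pvLt m c := h
      have hstep : pvUpd (some m) c = some m := by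
        rw [show pvUpd (some m) c
              = if m.1 < c.1 ∨ (m.1 = c.1 ∧ m.2 < c.2) then some c else some m from rfl,
           if_neg h]
      rw [hstep]
      obtain ⟨m', heq, hmem, hmax⟩ := ih m
      have hmem' : m' ∈ m :: c :: cs := by
        rcases List.mem_cons.mp hmem with rfl | hm'
        · exact List.mem_cons_self
        · exact List.mem_cons_of_mem _ (List.mem_cons_of_mem _ hm')
      refine ⟨m', heq, hmem', ?_⟩
      intro y hy
      rcases List.mem_cons.mp hy with rfl | hy'
      · exact hmax y List.mem_cons_self
      · rcases List.mem_cons.mp hy' with rfl | hy''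
        · -- y = c : were pvLt m' c, then (since ¬ pvLt m c) pvLt m' m, contradicting maximality
          intro hc
          have hnm'm : ¬ pvLt m' m := hmax m List.mem_cons_self
          by_cases hcm : pvLt y m
          · exact hnm'm (pvLt_trans hc hcm)
          · exact hnm'm (pvLt_resolve hcm hnlt ▸ hc)
        · exact hmax y (List.mem_cons_of_mem _ hy'')

-- bridge: B's one-pass fold over valleys equals the running-max fold over A's candidate list
theorem pvBridge (lo hi : Int) : ∀ (vs acc : List (Int × Int)),
    vs.foldl (fun best ab =>
        let mid := PySem.Int.floordiv (ab.1 + ab.2) 2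
        if lo ≤ mid ∧ mid ≤ hi then pvUpd best (ab.2 - ab.1 + 1, mid) else best)
      (acc.foldl pvUpd none)
    = (vs.foldl (fun acc ab =>
        let mid := PySem.Int.floordiv (ab.1 + ab.2) 2
        if lo ≤ mid ∧ mid ≤ hi then acc ++ [(ab.2 - ab.1 + 1, mid)] else acc) acc).foldl pvUpd none := by
  intro vs
  induction vs with
  | nil => intro acc; rfl
  | cons ab vs ih =>
    intro acc
    simp only [List.foldl_cons]
    by_cases h : lo ≤ PySem.Int.floordiv (ab.1 + ab.2) 2 ∧ PySem.Int.floordiv (ab.1 + ab.2) 2 ≤ hi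
    · simp only [if_pos h]
      rw [show pvUpd (acc.foldl pvUpd none) (ab.2 - ab.1 + 1, PySem.Int.floordiv (ab.1 + ab.2) 2)
            = (acc ++ [(ab.2 - ab.1 + 1, PySem.Int.floordiv (ab.1 + ab.2) 2)]).foldl pvUpd none from by
        rw [List.foldl_append]; rfl]
      exact ih _
    · simp only [if_neg h]
      exact ih acc

-- ===== VERDICT (by name: the statement is the Claim_ definition above) =====
theorem best_valley_cut_py_spec : Claim_equal_best_valley_cut_py := by
  intro valleys size _
  unfold Spec_best_valley_cut_py best_valley_cut_py best_valley_cut_py_alt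
  dsimp only
  have hb := pvBridge (pvTruncMul size 54) (pvTruncMul size 52) valleys []
  simp only [List.foldl_nil] at hb
  rw [hb]
  set cs := valleys.foldl (fun acc ab =>
      if pvTruncMul size 54 ≤ PySem.Int.floordiv (ab.1 + ab.2) 2 ∧
          PySem.Int.floordiv (ab.1 + ab.2) 2 ≤ pvTruncMul size 52 then
        acc ++ [(ab.2 - ab.1 + 1, PySem.Int.floordiv (ab.1 + ab.2) 2)] else acc) [] with hcs_def
  cases hcs : cs with
  | nil => simp
  | cons c0 rest =>
    rw [if_neg (by simp)]
    have hperm := PySem.List.sorted2_perm cs (fun c : Int × Int => c.1) (fun c => c.2) true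
    cases hs : PySem.List.sorted2 cs (fun c => c.1) (fun c => c.2) true with
    | nil =>
      rw [hs] at hperm
      have hlen := hperm.length_eq
      simp [hcs] at hlen
    | cons m t =>
      rw [hs] at hperm
      have hpw : (m :: t).Pairwise (fun a b => ¬ pvLt a b) := by
        rw [← hs, sorted2_eq]
        exact fold_pairwise cs [] (by simp)
      have hmem_m : m ∈ cs := hperm.subset List.mem_cons_self
      have hmax_m : ∀ y ∈ cs, ¬ pvLt m y := by
        intro y hy
        rcases List.mem_cons.mp (hperm.mem_iff.mpr hy) with rfl | hy'
        · exact pvLt_irrefl y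
        · exact (List.pairwise_cons.mp hpw).1 y hy'
      have hfold : cs.foldl pvUpd none = rest.foldl pvUpd (some c0) := by
        rw [hcs]; rfl
      obtain ⟨m', heq, hmem', hmax'⟩ := updFold_spec rest c0
      have hmem'cs : m' ∈ cs := by rw [hcs]; exact hmem'
      have hmm' : m = m' :=
        pvLt_resolve (hmax_m m' hmem'cs) (hmax' m (hcs ▸ hmem_m))
      rw [← hcs, hs, hfold, heq, ← hmm']
      rfl
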